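-- pv_equiv track=rewrite | github.com/asmit404/GFG_Solutions | Prefix Suffix String.py | prefixSuffixString
-- ===== SOURCE A (Python) =====
-- def prefixSuffixString(s1, s2) -> int:
--     res = set()
--     ans = 0
--     for s in s1:
--         for i in range(len(s)):
--             res.add(s[:i+1])
--             res.add(s[i:])
--     for s in s2:
--         if s in res:
--             ans += 1
--     return ans
-- ===== SOURCE B (Python) =====
-- def prefixSuffixString(s1, s2) -> int:
--     # Count directly: t is counted iff it is a nonempty prefix or suffix of some s in s1.
--     return sum(1 for t in s2
--                if t and any(s.startswith(t) or s.endswith(t) for s in s1))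
-- ===== Notes on version B (the rewrite author's own statement) =====
-- stated objective: simpler
-- what changed: B drops A's materialised set of all prefixes/suffixes and instead counts each s2 string directly by testing startswith/endswith against s1, a one-liner with O(1) extra space.
import Mathlib
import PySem

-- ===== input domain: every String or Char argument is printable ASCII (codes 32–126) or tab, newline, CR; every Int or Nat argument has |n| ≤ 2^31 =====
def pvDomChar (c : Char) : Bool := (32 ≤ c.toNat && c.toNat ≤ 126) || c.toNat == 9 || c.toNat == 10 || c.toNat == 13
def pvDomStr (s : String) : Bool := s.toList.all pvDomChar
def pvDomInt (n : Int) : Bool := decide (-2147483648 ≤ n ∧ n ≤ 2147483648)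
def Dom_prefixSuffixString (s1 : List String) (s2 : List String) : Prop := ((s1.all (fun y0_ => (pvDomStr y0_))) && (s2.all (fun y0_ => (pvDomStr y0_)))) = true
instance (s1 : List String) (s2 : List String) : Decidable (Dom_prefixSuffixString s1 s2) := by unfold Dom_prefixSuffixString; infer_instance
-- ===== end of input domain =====

-- B replaces A's materialised set of all prefixes/suffixes by a direct
-- startswith/endswith count over s1 for each s2 string (same result, O(1) extra space).


-- ===== PORT A =====
-- res.add(s[:i+1]); res.add(s[i:])  — one step of A's inner loop
def pvAddPS (s : String) (res : PySem.Set String) (i : Int) : PySem.Set String :=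
  PySem.Set.add (PySem.Set.add res (PySem.Str.slice s none (some (i + 1))))
    (PySem.Str.slice s (some i) none)

def prefixSuffixString (s1 : List String) (s2 : List String) : Int :=
  let res : PySem.Set String :=
    s1.foldl (fun res s => (PySem.List.pyRange 0 (PySem.Str.len s) 1).foldl (pvAddPS s) res)
      PySem.Set.empty
  s2.foldl (fun ans s => if PySem.Set.contains res s then ans + 1 else ans) 0

-- ===== PORT B =====
-- 't and any(s.startswith(t) or s.endswith(t) for s in s1)'
def pvHit (s1 : List String) (t : String) : Bool :=
  t != "" && s1.any (fun s => PySem.Str.startswith s t || PySem.Str.endswith s t)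

def prefixSuffixString_alt (s1 : List String) (s2 : List String) : Int :=
  (s2.countP (pvHit s1) : Int)

-- ===== PRECONDITION & SPEC =====
def Spec_prefixSuffixString (s1 : List String) (s2 : List String) (out : Int) : Prop := out = prefixSuffixString_alt s1 s2
instance (s1 : List String) (s2 : List String) (out : Int) : Decidable (Spec_prefixSuffixString s1 s2 out) := by unfold Spec_prefixSuffixString; infer_instance

-- ===== CLAIM (what is proved, stated in full; the proofs are below) =====
def Claim_equal_prefixSuffixString : Prop := ∀ (s1 : List String) (s2 : List String), Dom_prefixSuffixString s1 s2 → Spec_prefixSuffixString s1 s2 (prefixSuffixString s1 s2)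

-- ===== LEMMAS AND PROOFS =====

-- membership in A's inner loop over an arbitrary index list
theorem mem_foldl_pvAddPS (s : String) (l : List Int) (res : PySem.Set String) (t : String) :
    t ∈ l.foldl (pvAddPS s) res ↔
      t ∈ res ∨ ∃ i ∈ l,
        (t = PySem.Str.slice s none (some (i + 1)) ∨ t = PySem.Str.slice s (some i) none) := by
  induction l generalizing res with
  | nil => simp
  | cons x xs ih =>
    simp only [List.foldl_cons, ih, pvAddPS, PySem.Set.mem_add, List.mem_cons]
    constructor
    · rintro (((h | h) | h) | ⟨i, hi, h⟩)
      · exact Or.inl h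
      · exact Or.inr ⟨x, Or.inl rfl, Or.inl h⟩
      · exact Or.inr ⟨x, Or.inl rfl, Or.inr h⟩
      · exact Or.inr ⟨i, Or.inr hi, h⟩
    · rintro (h | ⟨i, (rfl | hi), h⟩)
      · exact Or.inl (Or.inl (Or.inl h))
      · rcases h with h | h
        · exact Or.inl (Or.inl (Or.inr h))
        · exact Or.inl (Or.inr h)
      · exact Or.inr ⟨i, hi, h⟩

-- membership in A's whole set
theorem mem_res_outer (s1 : List String) (res : PySem.Set String) (t : String) :
    t ∈ s1.foldl (fun res s => (PySem.List.pyRange 0 (PySem.Str.len s) 1).foldl (pvAddPS s) res) res ↔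
      t ∈ res ∨ ∃ s ∈ s1, ∃ i ∈ PySem.List.pyRange 0 (PySem.Str.len s) 1,
        (t = PySem.Str.slice s none (some (i + 1)) ∨ t = PySem.Str.slice s (some i) none) := by
  induction s1 generalizing res with
  | nil => simp
  | cons x xs ih =>
    simp only [List.foldl_cons, ih, mem_foldl_pvAddPS, List.mem_cons]
    constructor
    · rintro (⟨h | ⟨i, hi, h⟩⟩ | ⟨s, hs, hrest⟩)
      · exact Or.inl h
      · exact Or.inr ⟨x, Or.inl rfl, i, hi, h⟩
      · exact Or.inr ⟨s, Or.inr hs, hrest⟩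
    · rintro (h | ⟨s, (rfl | hs), hrest⟩)
      · exact Or.inl (Or.inl h)
      · exact Or.inl (Or.inr hrest)
      · exact Or.inr ⟨s, hs, hrest⟩

-- the slice taken at a valid index is exactly "nonempty prefix or suffix"
theorem slice_mem_char (s t : String) :
    (∃ i ∈ PySem.List.pyRange 0 (PySem.Str.len s) 1,
        (t = PySem.Str.slice s none (some (i + 1)) ∨ t = PySem.Str.slice s (some i) none)) ↔
      (t ≠ "" ∧ (PySem.Str.startswith s t || PySem.Str.endswith s t) = true) := by
  constructor
  · rintro ⟨i, hi, h⟩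
    rw [PySem.List.mem_pyRange_one] at hi
    simp only [PySem.Str.len_eq] at hi
    obtain ⟨h0, hlt⟩ := hi
    have hne : t.toList ≠ [] ∧ (t.toList <+: s.toList ∨ t.toList <:+ s.toList) := by
      rcases h with rfl | rfl
      · have htl : (PySem.Str.slice s none (some (i + 1))).toList = s.toList.take (i + 1).toNat := by
          rw [PySem.Str.toList_slice, PySem.Chars.slice_eq_listSlice,
            PySem.List.slice_to s.toList (by omega : (0:Int) ≤ i + 1)]
        rw [htl]
        refine ⟨fun hcon => ?_, Or.inl (List.take_prefix _ _)⟩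
        have := congrArg List.length hcon
        simp only [List.length_take, List.length_nil] at this
        omega
      · have htl : (PySem.Str.slice s (some i) none).toList = s.toList.drop i.toNat := by
          rw [PySem.Str.toList_slice, PySem.Chars.slice_eq_listSlice,
            PySem.List.slice_from s.toList h0]
        rw [htl]
        refine ⟨fun hcon => ?_, Or.inr (List.drop_suffix _ _)⟩
        have := congrArg List.length hcon
        simp only [List.length_drop, List.length_nil] at this
        omega
    refine ⟨fun he => hne.1 (by simp [he]), ?_⟩
    rw [Bool.or_eq_true, PySem.Str.startswith_eq, PySem.Str.endswith_eq]
    rcases hne.2 with hp | hsuf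
    · exact Or.inl ((PySem.Chars.startswith_iff _ _).mpr hp)
    · exact Or.inr ((PySem.Chars.endswith_iff _ _).mpr hsuf)
  · rintro ⟨hne, hor⟩
    have hne' : t.toList ≠ [] := fun h => hne (String.toList_inj.mp (by simp [h]))
    have hk : 1 ≤ t.toList.length := by
      cases ht : t.toList with
      | nil => exact absurd ht hne'
      | cons a l => simp
    rw [Bool.or_eq_true, PySem.Str.startswith_eq, PySem.Str.endswith_eq] at hor
    rcases hor with hp | hsuf
    · have hp' : t.toList <+: s.toList := (PySem.Chars.startswith_iff _ _).mp hp
      have hle : t.toList.length ≤ s.toList.length := hp'.length_le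
      refine ⟨(t.toList.length : Int) - 1, ?_, Or.inl ?_⟩
      · rw [PySem.List.mem_pyRange_one]; rw [PySem.Str.len_eq]; omega
      · apply String.toList_inj.mp
        rw [PySem.Str.toList_slice, PySem.Chars.slice_eq_listSlice]
        have harg : ((t.toList.length : Int) - 1 + 1) = (t.toList.length : Int) := by ring
        rw [harg, PySem.List.slice_to s.toList (by omega : (0:Int) ≤ (t.toList.length : Int))]
        rw [Int.toNat_natCast]
        exact List.prefix_iff_eq_take.mp hp'
    · have hs' : t.toList <:+ s.toList := (PySem.Chars.endswith_iff _ _).mp hsuf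
      have hle : t.toList.length ≤ s.toList.length := hs'.length_le
      refine ⟨(s.toList.length : Int) - (t.toList.length : Int), ?_, Or.inr ?_⟩
      · rw [PySem.List.mem_pyRange_one]; rw [PySem.Str.len_eq]; omega
      · apply String.toList_inj.mp
        rw [PySem.Str.toList_slice, PySem.Chars.slice_eq_listSlice,
          PySem.List.slice_from s.toList (by omega : (0:Int) ≤ (s.toList.length : Int) - (t.toList.length : Int))]
        have harg : ((s.toList.length : Int) - (t.toList.length : Int)).toNat
            = s.toList.length - t.toList.length := by omega
        rw [harg]
        exact List.suffix_iff_eq_drop.mp hs'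

-- ===== VERDICT (by name: the statement is the Claim_ definition above) =====
theorem prefixSuffixString_spec : Claim_equal_prefixSuffixString := by
  intro s1 s2 _
  unfold Spec_prefixSuffixString prefixSuffixString prefixSuffixString_alt
  rw [PySem.List.foldl_if_add_one]
  rw [zero_add, Int.natCast_inj]
  apply List.countP_congr
  intro t _
  rw [PySem.Set.contains_iff, mem_res_outer]
  simp only [pvHit, Bool.and_eq_true, bne_iff_ne, List.any_eq_true]
  constructor
  · rintro (h | ⟨s, hs, hrest⟩)
    · simp [PySem.Set.empty] at h
    · have := (slice_mem_char s t).mp hrest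
      exact ⟨this.1, s, hs, this.2⟩
  · rintro ⟨hne, s, hs, h⟩
    exact Or.inr ⟨s, hs, (slice_mem_char s t).mpr ⟨hne, h⟩⟩
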